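-- pv_equiv track=rewrite | github.com/huhengtong/UKD_CVPR2020 | teacher_model/map.py | make_train_dict
-- ===== SOURCE A (Python) =====
-- def push_query(query, url, dict):
-- 	if query in dict:
-- 		dict[query].append(url)
-- 	else:
-- 		dict[query] = [url]
-- 	return dict
--
-- def make_train_dict(query_list, url_list, label_dim):
-- 	query_url = {}
-- 	query_pos = {}
-- 	query_neg = {}
-- 	query_num = len(query_list)
-- 	url_num = len(url_list)
--
-- 	for i in range(query_num):
-- 		query = query_list[i]
-- 		for j in range(url_num):
-- 			url = url_list[j]
-- 			if i == j:
-- 				push_query(query, url, query_url)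
-- 				push_query(query, url, query_pos)
-- 			else:
-- 				push_query(query, url, query_url)
-- 				push_query(query, url, query_neg)
--
-- 	return query_url, query_pos, query_neg
-- ===== SOURCE B (Python) =====
-- def make_train_dict(query_list, url_list, label_dim):
-- 	query_url = {}
-- 	query_pos = {}
-- 	query_neg = {}
-- 	if not url_list:
-- 		return query_url, query_pos, query_neg
-- 	url_num = len(url_list)
-- 	for i in range(len(query_list)):
-- 		query = query_list[i]
-- 		query_url.setdefault(query, []).extend(url_list)
-- 		if i < url_num:
-- 			query_pos.setdefault(query, []).append(url_list[i])
-- 		neg = url_list[:i] + url_list[i+1:]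
-- 		if neg:
-- 			query_neg.setdefault(query, []).extend(neg)
-- 	return query_url, query_pos, query_neg
-- ===== Notes on version B (the rewrite author's own statement) =====
-- stated objective: simpler
-- what changed: B drops A's inner per-url loop and its i==j branch: one pass over the query indices does a bulk setdefault/extend with the whole url list, appends url_list[i] as the positive when it exists, and builds the negatives by slicing url_list[:i] + url_list[i+1:].
import Mathlib
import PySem

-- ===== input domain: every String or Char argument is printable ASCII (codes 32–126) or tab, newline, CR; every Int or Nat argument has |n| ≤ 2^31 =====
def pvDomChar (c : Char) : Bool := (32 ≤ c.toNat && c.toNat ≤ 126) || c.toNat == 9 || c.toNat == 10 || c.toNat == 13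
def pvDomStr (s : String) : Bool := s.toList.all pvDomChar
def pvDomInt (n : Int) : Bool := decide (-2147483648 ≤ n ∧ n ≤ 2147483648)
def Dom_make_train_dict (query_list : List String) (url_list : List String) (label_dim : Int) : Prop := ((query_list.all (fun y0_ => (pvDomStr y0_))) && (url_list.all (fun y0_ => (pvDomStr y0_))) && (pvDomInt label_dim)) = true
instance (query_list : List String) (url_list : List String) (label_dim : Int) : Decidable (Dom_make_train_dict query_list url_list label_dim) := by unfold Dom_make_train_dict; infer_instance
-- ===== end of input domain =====

-- B replaces A's nested per-url loop (one push_query per (query, url) pair) by one bulk dict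
-- update per query, computing the negatives by list slicing; same return value, objective: simpler.

-- ===== PORT A =====
-- Python push_query: if query in dict: dict[query].append(url) else: dict[query] = [url]
def push_query (query : String) (url : String) (d : PySem.Dict String (List String)) : PySem.Dict String (List String) :=
  if d.contains query then d.modify query [] (fun l => l ++ [url])
  else d.insert query [url]

-- the double loop of A over (i, j), building the three dicts
def loopA (query_list : List String) (url_list : List String) :
    PySem.Dict String (List String) × PySem.Dict String (List String) × PySem.Dict String (List String) :=
  (PySem.List.pyRange 0 (query_list.length : Int) 1).foldl
    (fun st i =>
      let query := PySem.List.pyGetD query_list i ""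
      (PySem.List.pyRange 0 (url_list.length : Int) 1).foldl
        (fun st2 j =>
          let url := PySem.List.pyGetD url_list j ""
          if i == j then (push_query query url st2.1, push_query query url st2.2.1, st2.2.2)
          else (push_query query url st2.1, st2.2.1, push_query query url st2.2.2))
        st)
    (PySem.Dict.empty, PySem.Dict.empty, PySem.Dict.empty)

def make_train_dict (query_list : List String) (url_list : List String) (label_dim : Int) : (List (String × List String)) × (List (String × List String)) × (List (String × List String)) :=
  ((loopA query_list url_list).1.items,
   (loopA query_list url_list).2.1.items,
   (loopA query_list url_list).2.2.items)

-- ===== PORT B =====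
-- Python's d.setdefault(q, []).extend(us) (and .append(u) = extend by a singleton): the stored
-- list grows in place; a missing key is first inserted at the end with value [].
def sdExtend (d : PySem.Dict String (List String)) (q : String) (us : List String) : PySem.Dict String (List String) :=
  (d.setdefault q []).modify q [] (fun l => l ++ us)

-- B's single loop over the query indices
def loopB (query_list : List String) (url_list : List String) :
    PySem.Dict String (List String) × PySem.Dict String (List String) × PySem.Dict String (List String) :=
  (PySem.List.pyRange 0 (query_list.length : Int) 1).foldl
    (fun st i =>
      let query := PySem.List.pyGetD query_list i ""
      let qu := sdExtend st.1 query url_list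
      let qp := if i < (url_list.length : Int) then sdExtend st.2.1 query [PySem.List.pyGetD url_list i ""] else st.2.1
      let neg := PySem.List.slice url_list none (some i) ++ PySem.List.slice url_list (some (i + 1)) none
      let qn := if neg.isEmpty then st.2.2 else sdExtend st.2.2 query neg
      (qu, qp, qn))
    (PySem.Dict.empty, PySem.Dict.empty, PySem.Dict.empty)

def make_train_dict_alt (query_list : List String) (url_list : List String) (label_dim : Int) : (List (String × List String)) × (List (String × List String)) × (List (String × List String)) :=
  if url_list.isEmpty then
    ((PySem.Dict.empty : PySem.Dict String (List String)).items,
     (PySem.Dict.empty : PySem.Dict String (List String)).items,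
     (PySem.Dict.empty : PySem.Dict String (List String)).items)
  else
    ((loopB query_list url_list).1.items,
     (loopB query_list url_list).2.1.items,
     (loopB query_list url_list).2.2.items)

-- ===== PRECONDITION & SPEC =====
def Spec_make_train_dict (query_list : List String) (url_list : List String) (label_dim : Int) (out : (List (String × List String)) × (List (String × List String)) × (List (String × List String))) : Prop := out = make_train_dict_alt query_list url_list label_dim
instance (query_list : List String) (url_list : List String) (label_dim : Int) (out : (List (String × List String)) × (List (String × List String)) × (List (String × List String))) : Decidable (Spec_make_train_dict query_list url_list label_dim out) := by unfold Spec_make_train_dict; infer_instance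

-- ===== CLAIM (what is proved, stated in full; the proofs are below) =====
def Claim_equal_make_train_dict : Prop := ∀ (query_list : List String) (url_list : List String) (label_dim : Int), Dom_make_train_dict query_list url_list label_dim → Spec_make_train_dict query_list url_list label_dim (make_train_dict query_list url_list label_dim)

-- ===== LEMMAS AND PROOFS =====

-- modify, unfolded (definitional)
theorem modify_eq_insert (d : PySem.Dict String (List String)) (k : String) (d0 : List String) (f : List String → List String) :
    d.modify k d0 f = d.insert k (f (d.getD k d0)) := rfl

-- A's push_query is one modify-append
theorem push_eq (q u : String) (d : PySem.Dict String (List String)) :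
    push_query q u d = d.modify q [] (fun l => l ++ [u]) := by
  unfold push_query
  by_cases h : d.contains q = true
  · simp [h]
  · have hf : d.contains q = false := by simpa using h
    rw [if_neg h, modify_eq_insert, PySem.Dict.getD_of_not_contains d [] hf]
    rfl

-- B's setdefault-then-extend is one modify-append
theorem sd_eq (d : PySem.Dict String (List String)) (q : String) (us : List String) :
    sdExtend d q us = d.modify q [] (fun l => l ++ us) := by
  unfold sdExtend
  by_cases h : d.contains q = true
  · rw [PySem.Dict.setdefault_of_contains d [] h]
  · have hf : d.contains q = false := by simpa using h
    rw [PySem.Dict.setdefault_of_not_contains d [] hf,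
        modify_eq_insert, modify_eq_insert,
        PySem.Dict.getD_insert_self, PySem.Dict.insert_insert_self,
        PySem.Dict.getD_of_not_contains d [] hf]

-- two modify-appends at the same key fuse
theorem modify_modify (d : PySem.Dict String (List String)) (k : String) (f g : List String → List String) :
    (d.modify k [] f).modify k [] g = d.modify k [] (fun l => g (f l)) := by
  rw [modify_eq_insert, modify_eq_insert, modify_eq_insert,
      PySem.Dict.getD_insert_self, PySem.Dict.insert_insert_self]

-- the per-url push loop on one dict, as a fold
def mfold (q : String) (d : PySem.Dict String (List String)) (us : List String) : PySem.Dict String (List String) :=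
  us.foldl (fun d u => d.modify q [] (fun l => l ++ [u])) d

theorem mfold_append (q : String) (d : PySem.Dict String (List String)) (us vs : List String) :
    mfold q d (us ++ vs) = mfold q (mfold q d us) vs :=
  List.foldl_append

theorem mfold_singleton (q u : String) (d : PySem.Dict String (List String)) :
    mfold q d [u] = d.modify q [] (fun l => l ++ [u]) := rfl

theorem mfold_eq (q : String) (us : List String) (d : PySem.Dict String (List String)) :
    mfold q d us = if us = [] then d else d.modify q [] (fun l => l ++ us) := by
  induction us generalizing d with
  | nil => rfl
  | cons u us ih =>
    show mfold q (d.modify q [] (fun l => l ++ [u])) us = _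
    rw [ih]
    cases us with
    | nil => simp
    | cons v vs =>
      rw [if_neg (by simp), if_neg (by simp), modify_modify]
      simp

-- removing the element at position t commutes with appending one element, when t ≠ |P|
theorem erase_append_singleton (P : List String) (a : String) (t : Nat) (ht : t ≠ P.length) :
    ((P ++ [a]).take t ++ (P ++ [a]).drop (t + 1)) = (P.take t ++ P.drop (t + 1)) ++ [a] := by
  rcases Nat.lt_or_ge t P.length with h | h
  · rw [List.take_append_of_le_length (by omega), List.drop_append]
    have h0 : t + 1 - P.length = 0 := by omega
    simp [h0]
  · have h' : P.length < t := by omega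
    rw [List.take_append, List.drop_append]
    rw [List.take_of_length_le (le_of_lt h'),
        List.take_of_length_le (by simp; omega),
        List.drop_eq_nil_of_le (by omega),
        List.drop_eq_nil_of_le (by simp; omega)]
    simp

-- characterisation of A's inner loop over the first n urls
theorem inner_eq (q : String) (ul : List String) (i : Int) (hi : 0 ≤ i) (n : Nat) (hn : n ≤ ul.length)
    (st : PySem.Dict String (List String) × PySem.Dict String (List String) × PySem.Dict String (List String)) :
    (PySem.List.pyRange 0 (n : Int) 1).foldl
      (fun st2 j =>
        let url := PySem.List.pyGetD ul j ""
        if i == j then (push_query q url st2.1, push_query q url st2.2.1, st2.2.2)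
        else (push_query q url st2.1, st2.2.1, push_query q url st2.2.2)) st
    = (mfold q st.1 (ul.take n),
       if i < (n : Int) then (st.2.1).modify q [] (fun l => l ++ [ul.getD i.toNat ""]) else st.2.1,
       mfold q st.2.2 ((ul.take n).take i.toNat ++ (ul.take n).drop (i.toNat + 1))) := by
  induction n with
  | zero =>
    rw [PySem.List.pyRange_one_eq_nil (by norm_num)]
    have h0 : ¬ i < (0 : Int) := by omega
    simp [mfold, h0]
  | succ n ih =>
    have hn' : n ≤ ul.length := Nat.le_of_succ_le hn
    have hlt : n < ul.length := hn
    have h0n : (0 : Int) ≤ (n : Nat) := Int.natCast_nonneg n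
    have hcast : ((n + 1 : Nat) : Int) = ((n : Nat) : Int) + 1 := by push_cast; ring
    have hurl : PySem.List.pyGetD ul ((n : Nat) : Int) "" = ul.getD n "" := PySem.List.pyGetD_natCast ul n ""
    have hgetd : ul.getD n "" = ul[n] := List.getD_eq_getElem ul "" hlt
    have htake : ul.take (n + 1) = ul.take n ++ [ul.getD n ""] := by
      rw [List.take_succ_eq_append_getElem hlt, hgetd]
    have hlen : (ul.take n).length = n := by simp [hn']
    rw [hcast, PySem.List.pyRange_one_succ_right h0n, List.foldl_append, ih hn']
    simp only [List.foldl_cons, List.foldl_nil, hurl]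
    by_cases hij : i = ((n : Nat) : Int)
    · have ht : i.toNat = n := by omega
      have hbeq : (i == ((n : Nat) : Int)) = true := by simpa using hij
      have hposo : ¬ i < ((n : Nat) : Int) := by omega
      have hposn : i < ((n : Nat) : Int) + 1 := by omega
      have e1 : List.take n (List.take n ul ++ [ul.getD n ""]) = List.take n ul := by
        rw [List.take_append_of_le_length (by omega)]
        exact List.take_of_length_le (by omega)
      have e2 : List.drop (n + 1) (List.take n ul ++ [ul.getD n ""]) = [] :=
        List.drop_eq_nil_of_le (by simp [hlen])
      have e3 : List.take n (List.take n ul) = List.take n ul := List.take_of_length_le (by omega)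
      have e4 : List.drop (n + 1) (List.take n ul) = [] := List.drop_eq_nil_of_le (by omega)
      have hneg : (ul.take (n + 1)).take i.toNat ++ (ul.take (n + 1)).drop (i.toNat + 1)
          = (ul.take n).take i.toNat ++ (ul.take n).drop (i.toNat + 1) := by
        rw [ht, htake, e1, e2, e3, e4]
      rw [hneg, htake]
      simp only [hbeq, if_true, if_neg hposo, if_pos hposn, ht]
      rw [mfold_append q st.1 (ul.take n) [ul.getD n ""], mfold_singleton, push_eq, push_eq]
    · have ht : i.toNat ≠ n := by omega
      have hbeq : (i == ((n : Nat) : Int)) = false := by simpa using hij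
      have hiff : (i < ((n : Nat) : Int) + 1) ↔ (i < ((n : Nat) : Int)) := by omega
      have hneg : (ul.take (n + 1)).take i.toNat ++ (ul.take (n + 1)).drop (i.toNat + 1)
          = ((ul.take n).take i.toNat ++ (ul.take n).drop (i.toNat + 1)) ++ [ul.getD n ""] := by
        rw [htake]
        exact erase_append_singleton (ul.take n) (ul.getD n "") i.toNat (by omega)
      rw [hneg, htake]
      simp only [hbeq, Bool.false_eq_true, if_false, hiff]
      rw [mfold_append q st.1 (ul.take n) [ul.getD n ""],
          mfold_append q st.2.2 ((ul.take n).take i.toNat ++ (ul.take n).drop (i.toNat + 1)) [ul.getD n ""],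
          mfold_singleton, mfold_singleton, push_eq, push_eq]

-- ===== VERDICT (by name: the statement is the Claim_ definition above) =====
theorem make_train_dict_spec : Claim_equal_make_train_dict := by
  intro ql ul ld _
  unfold Spec_make_train_dict make_train_dict make_train_dict_alt
  by_cases hul : ul = []
  · subst hul
    have hA : loopA ql [] = (PySem.Dict.empty, PySem.Dict.empty, PySem.Dict.empty) := by
      unfold loopA
      rw [PySem.List.foldl_congr_mem _ _ (fun st _ => st) _ ?_]
      · exact List.foldl_fixed _
      · intro acc x _
        simp [PySem.List.pyRange_one_eq_nil (le_refl (0 : Int))]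
    simp [hA]
  · have hne : ul.isEmpty = false := by simpa [List.isEmpty_iff] using hul
    have hAB : loopA ql ul = loopB ql ul := by
      unfold loopA loopB
      apply PySem.List.foldl_congr_mem
      intro st i hmem
      have hi : (0 : Int) ≤ i := (PySem.List.mem_pyRange_one.mp hmem).1
      have hi1 : (0 : Int) ≤ i + 1 := by omega
      have ht1 : (i + 1).toNat = i.toNat + 1 := by omega
      have hslice : PySem.List.slice ul none (some i) ++ PySem.List.slice ul (some (i + 1)) none
          = List.take i.toNat ul ++ List.drop (i.toNat + 1) ul := by
        rw [PySem.List.slice_to ul hi, PySem.List.slice_from ul hi1, ht1]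
      show (PySem.List.pyRange 0 (ul.length : Int) 1).foldl _ st = _
      rw [show ((ul.length : Int)) = ((ul.length : Nat) : Int) from rfl]
      rw [inner_eq (PySem.List.pyGetD ql i "") ul i hi ul.length le_rfl st]
      simp only [List.take_length]
      rw [mfold_eq, if_neg hul, mfold_eq]
      simp only [sd_eq, hslice, PySem.List.pyGetD_of_nonneg ul "" hi, List.isEmpty_iff]
    simp [hne, hAB]
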